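-- pv_equiv track=rewrite | github.com/SonicSlayer/SonicSlayer-Tools | tools.py | get_swizzled_coords
-- ===== SOURCE A (Python) =====
-- def get_swizzled_coords(d, pbx):
--     tile_idx, in_tile = d // 64, d % 64
--     tiles_wide = pbx // 8
--     tx, ty = tile_idx % tiles_wide, tile_idx // tiles_wide
--     ix = iy = 0
--     temp = in_tile
--     for i in range(3):
--         ix |= (temp & 1) << i
--         temp >>= 1
--         iy |= (temp & 1) << i
--         temp >>= 1
--     return tx * 8 + ix, ty * 8 + iy
-- ===== SOURCE B (Python) =====
-- # Build the forward swizzle (pixel -> in-tile offset) once and invert it into a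
-- # lookup table, instead of de-interleaving bits per call.
-- _DESWIZZLE = {}
-- for _y in range(8):
--     for _x in range(8):
--         _off = 0
--         for _b in range(3):
--             _off |= ((_x >> _b) & 1) << (2 * _b)
--             _off |= ((_y >> _b) & 1) << (2 * _b + 1)
--         _DESWIZZLE[_off] = (_x, _y)
--
-- def get_swizzled_coords(d, pbx):
--     ty, tx = divmod(d // 64, pbx // 8)
--     ix, iy = _DESWIZZLE[d % 64]
--     return tx * 8 + ix, ty * 8 + iy
-- ===== Notes on version B (the rewrite author's own statement) =====
-- stated objective: alternative
-- what changed: Instead of de-interleaving the in-tile bits per call, B precomputes the forward swizzle map (pixel -> offset) once over all 64 tile pixels and inverts it into a lookup table; each call is a divmod plus a table lookup.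
import Mathlib
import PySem

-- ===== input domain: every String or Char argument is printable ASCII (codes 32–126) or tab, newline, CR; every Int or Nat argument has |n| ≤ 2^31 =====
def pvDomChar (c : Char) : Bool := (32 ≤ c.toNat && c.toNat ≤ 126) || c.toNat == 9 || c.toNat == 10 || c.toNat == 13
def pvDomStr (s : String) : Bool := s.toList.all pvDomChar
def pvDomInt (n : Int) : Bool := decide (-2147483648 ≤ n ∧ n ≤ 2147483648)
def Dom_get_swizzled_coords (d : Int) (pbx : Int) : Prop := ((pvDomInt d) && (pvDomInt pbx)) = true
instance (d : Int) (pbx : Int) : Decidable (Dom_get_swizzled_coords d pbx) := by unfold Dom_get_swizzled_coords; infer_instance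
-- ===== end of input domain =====

-- B precomputes the forward swizzle map over all 64 tile pixels once and inverts it
-- into a lookup table; each call is a divmod plus a table lookup (objective: alternative).

-- ===== PORT A =====
def get_swizzled_coords (d : Int) (pbx : Int) : Int × Int :=
  let tile_idx := PySem.Int.floordiv d 64
  let in_tile := PySem.Int.mod d 64
  let tiles_wide := PySem.Int.floordiv pbx 8
  let tx := PySem.Int.mod tile_idx tiles_wide
  let ty := PySem.Int.floordiv tile_idx tiles_wide
  -- loop 'for i in range(3)' over state (ix, iy, temp); shift count i ≥ 0, so '.toNat' is exact
  let st := (PySem.List.pyRange 0 3 1).foldl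
    (fun (st : Int × Int × Int) i =>
      let ix := PySem.Int.bor st.1 ((PySem.Int.band st.2.2 1) <<< i.toNat)
      let temp := st.2.2 >>> 1
      let iy := PySem.Int.bor st.2.1 ((PySem.Int.band temp 1) <<< i.toNat)
      (ix, iy, temp >>> 1)) (0, 0, in_tile)
  (tx * 8 + st.1, ty * 8 + st.2.1)

-- ===== PORT B =====
-- module-level table: for each pixel (x, y) of the 8×8 tile, compute its swizzled
-- offset with the forward interleave loop and record offset ↦ (x, y)
def pvDeswizzleTable : PySem.Dict Int (Int × Int) :=
  (PySem.List.pyRange 0 8 1).foldl (fun dct y =>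
    (PySem.List.pyRange 0 8 1).foldl (fun dct x =>
      let off := (PySem.List.pyRange 0 3 1).foldl (fun off b =>
        -- shift counts b, 2*b, 2*b+1 are ≥ 0, so '.toNat' is exact
        let off := PySem.Int.bor off ((PySem.Int.band (x >>> b.toNat) 1) <<< (2 * b).toNat)
        PySem.Int.bor off ((PySem.Int.band (y >>> b.toNat) 1) <<< (2 * b + 1).toNat)) 0
      PySem.Dict.insert dct off (x, y)) dct) PySem.Dict.empty

def get_swizzled_coords_alt (d : Int) (pbx : Int) : Int × Int :=
  let q := PySem.Int.divmod? (PySem.Int.floordiv d 64) (PySem.Int.floordiv pbx 8)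
  match q with
  | none => (0, 0)  -- unreachable under Pre_ (ZeroDivisionError excluded)
  | some (ty, tx) =>
    -- _DESWIZZLE[d % 64]; d % 64 ∈ [0, 64) is always a key, so KeyError is impossible
    match PySem.Dict.get? pvDeswizzleTable (PySem.Int.mod d 64) with
    | none => (0, 0)  -- unreachable: the table covers every offset 0..63
    | some (ix, iy) => (tx * 8 + ix, ty * 8 + iy)

-- ===== PRECONDITION & SPEC =====
-- Pre_ excludes exactly the inputs with pbx // 8 == 0 (0 ≤ pbx ≤ 7), where A raises ZeroDivisionError.
def Pre_get_swizzled_coords (d : Int) (pbx : Int) : Prop := PySem.Int.floordiv pbx 8 ≠ 0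
instance (d : Int) (pbx : Int) : Decidable (Pre_get_swizzled_coords d pbx) := by unfold Pre_get_swizzled_coords; infer_instance
def pvWitness_get_swizzled_coords : Int × Int := (100, 16)

def Spec_get_swizzled_coords (d : Int) (pbx : Int) (out : Int × Int) : Prop := out = get_swizzled_coords_alt d pbx
instance (d : Int) (pbx : Int) (out : Int × Int) : Decidable (Spec_get_swizzled_coords d pbx out) := by unfold Spec_get_swizzled_coords; infer_instance

-- ===== CLAIM (what is proved, stated in full; the proofs are below) =====
def Claim_equal_get_swizzled_coords : Prop := ∀ (d : Int) (pbx : Int), Dom_get_swizzled_coords d pbx → Pre_get_swizzled_coords d pbx → Spec_get_swizzled_coords d pbx (get_swizzled_coords d pbx)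

-- ===== LEMMAS AND PROOFS =====

-- A's de-interleave loop on a 6-bit value agrees with B's table lookup
set_option maxRecDepth 4000 in
theorem pv_loop_eq_lookup (t : Int) (h0 : 0 ≤ t) (h6 : t < 64) :
    PySem.Dict.get? pvDeswizzleTable t =
    some (((PySem.List.pyRange 0 3 1).foldl
      (fun (st : Int × Int × Int) i =>
        let ix := PySem.Int.bor st.1 ((PySem.Int.band st.2.2 1) <<< i.toNat)
        let temp := st.2.2 >>> 1
        let iy := PySem.Int.bor st.2.1 ((PySem.Int.band temp 1) <<< i.toNat)
        (ix, iy, temp >>> 1)) (0, 0, t)).1,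
      ((PySem.List.pyRange 0 3 1).foldl
      (fun (st : Int × Int × Int) i =>
        let ix := PySem.Int.bor st.1 ((PySem.Int.band st.2.2 1) <<< i.toNat)
        let temp := st.2.2 >>> 1
        let iy := PySem.Int.bor st.2.1 ((PySem.Int.band temp 1) <<< i.toNat)
        (ix, iy, temp >>> 1)) (0, 0, t)).2.1) := by
  interval_cases t <;> decide

-- ===== VERDICT (by name: the statement is the Claim_ definition above) =====
theorem get_swizzled_coords_spec : Claim_equal_get_swizzled_coords := by
  intro d pbx _ hpre
  unfold Spec_get_swizzled_coords get_swizzled_coords get_swizzled_coords_alt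
  have h0 : (0 : Int) ≤ PySem.Int.mod d 64 := PySem.Int.mod_nonneg d (by norm_num)
  have h6 : PySem.Int.mod d 64 < 64 := PySem.Int.mod_lt d (by norm_num)
  rw [pv_loop_eq_lookup (PySem.Int.mod d 64) h0 h6]
  unfold Pre_get_swizzled_coords at hpre
  simp only [PySem.Int.divmod?, PySem.Int.floordiv, PySem.Int.mod] at hpre ⊢
  rw [if_neg hpre]
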